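-- pv_equiv track=rewrite | github.com/skepsl/NuScenesV2 | NuScenes_utils/map.py | remove_overlapped_paths
-- ===== SOURCE A (Python) =====
-- import copy
--
-- def remove_overlapped_paths(possible_lane_list):
--     """
--     Remove redundant possible lane list, leave unique possible lane list
--     :param possible_lane_list:
--     :return:
--     """
--     out_list = []
--     possible_lane_list_tmp = copy.deepcopy(possible_lane_list)
--     while len(possible_lane_list) > 0:
--         cp = possible_lane_list[0]  #
--
--         # after this loop, there is no 'cp' in the list
--         while cp in possible_lane_list_tmp:
--             possible_lane_list_tmp.remove(cp)
--
--         out_list.append(cp)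
--         possible_lane_list = copy.deepcopy(possible_lane_list_tmp)
--
--     return out_list
-- ===== SOURCE B (Python) =====
-- def remove_overlapped_paths(possible_lane_list):
--     """
--     Remove redundant possible lane list, leave unique possible lane list
--     (single forward pass, first-occurrence order preserved)
--     """
--     out_list = []
--     for x in possible_lane_list:
--         if x not in out_list:
--             out_list.append(x)
--     return out_list
-- ===== Notes on version B (the rewrite author's own statement) =====
-- stated objective: simpler
-- what changed: Replaced A's nested while loops with deepcopy and repeated list.remove of the head element by a single forward pass that appends each element only if it is not already in the accumulated output.
import Mathlib
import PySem

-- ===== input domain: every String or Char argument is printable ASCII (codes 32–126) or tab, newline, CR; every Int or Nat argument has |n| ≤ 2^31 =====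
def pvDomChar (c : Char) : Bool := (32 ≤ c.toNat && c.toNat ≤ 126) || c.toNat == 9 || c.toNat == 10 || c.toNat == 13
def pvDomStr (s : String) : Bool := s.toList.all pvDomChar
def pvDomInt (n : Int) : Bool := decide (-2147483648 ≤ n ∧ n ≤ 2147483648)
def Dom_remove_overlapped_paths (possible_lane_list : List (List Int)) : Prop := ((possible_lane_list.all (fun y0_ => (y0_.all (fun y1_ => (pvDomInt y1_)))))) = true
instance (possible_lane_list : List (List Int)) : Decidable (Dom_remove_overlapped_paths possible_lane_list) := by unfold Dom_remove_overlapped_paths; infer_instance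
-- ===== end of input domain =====

-- B replaces A's nested while/deepcopy/remove dedup by one forward pass appending unseen elements (simpler, no copying).
-- ===== PORT A =====
-- inner loop `while cp in tmp: tmp.remove(cp)` — removes every occurrence of cp
def pvRemoveAll (cp : List Int) : List (List Int) → List (List Int)
  | [] => []
  | x :: xs => if x = cp then pvRemoveAll cp xs else x :: pvRemoveAll cp xs

theorem pvRemoveAll_length_le (cp : List Int) (l : List (List Int)) :
    (pvRemoveAll cp l).length ≤ l.length := by
  induction l with
  | nil => simp [pvRemoveAll]
  | cons x xs ih =>
    simp only [pvRemoveAll]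
    split <;> simp <;> omega

-- outer while loop: take the head cp, drop all its occurrences, continue on what is left
def remove_overlapped_paths (possible_lane_list : List (List Int)) : List (List Int) :=
  match possible_lane_list with
  | [] => []
  | cp :: rest => cp :: remove_overlapped_paths (pvRemoveAll cp rest)
  termination_by possible_lane_list.length
  decreasing_by
    simp only [List.length_cons]
    exact Nat.lt_succ_of_le (pvRemoveAll_length_le cp rest)

-- ===== PORT B =====
def remove_overlapped_paths_alt (possible_lane_list : List (List Int)) : List (List Int) :=
  possible_lane_list.foldl (fun out x => if x ∈ out then out else out ++ [x]) []

-- ===== PRECONDITION & SPEC =====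
def Spec_remove_overlapped_paths (possible_lane_list : List (List Int)) (out : List (List Int)) : Prop := out = remove_overlapped_paths_alt possible_lane_list
instance (possible_lane_list : List (List Int)) (out : List (List Int)) : Decidable (Spec_remove_overlapped_paths possible_lane_list out) := by unfold Spec_remove_overlapped_paths; infer_instance

-- ===== CLAIM (what is proved, stated in full; the proofs are below) =====
def Claim_equal_remove_overlapped_paths : Prop := ∀ (possible_lane_list : List (List Int)), Dom_remove_overlapped_paths possible_lane_list → Spec_remove_overlapped_paths possible_lane_list (remove_overlapped_paths possible_lane_list)

-- ===== LEMMAS AND PROOFS =====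

-- common intermediate: dedup with an explicit "seen" accumulator
def pvGo (seen : List (List Int)) : List (List Int) → List (List Int)
  | [] => []
  | x :: xs => if x ∈ seen then pvGo seen xs else x :: pvGo (seen ++ [x]) xs

theorem pvRemoveAll_eq_filter (cp : List Int) (l : List (List Int)) :
    pvRemoveAll cp l = l.filter (fun x => x ≠ cp) := by
  induction l with
  | nil => rfl
  | cons x xs ih =>
    simp only [pvRemoveAll, List.filter_cons]
    by_cases h : x = cp <;> simp [h, ih]

theorem pvGo_eq_A (xs : List (List Int)) : ∀ seen,
    pvGo seen xs = remove_overlapped_paths (xs.filter (fun x => x ∉ seen)) := by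
  induction xs with
  | nil => intro seen; simp [pvGo, remove_overlapped_paths]
  | cons x xs ih =>
    intro seen
    by_cases h : x ∈ seen
    · simp [pvGo, h, ih]
    · simp only [pvGo, h, if_false, List.filter_cons, not_false_iff, decide_true, if_pos]
      rw [remove_overlapped_paths, pvRemoveAll_eq_filter, List.filter_filter, ih]
      congr 2
      apply List.filter_congr
      intro y _
      by_cases h1 : y ∈ seen <;> by_cases h2 : y = x <;> simp [h1, h2]

theorem pvFoldl_eq_go (xs : List (List Int)) : ∀ out,
    xs.foldl (fun out x => if x ∈ out then out else out ++ [x]) out = out ++ pvGo out xs := by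
  induction xs with
  | nil => intro out; simp [pvGo]
  | cons x xs ih =>
    intro out
    by_cases h : x ∈ out
    · simp [List.foldl_cons, h, pvGo, ih]
    · simp [List.foldl_cons, h, pvGo, ih]

-- ===== VERDICT (by name: the statement is the Claim_ definition above) =====
theorem remove_overlapped_paths_spec : Claim_equal_remove_overlapped_paths := by
  intro l _
  unfold Spec_remove_overlapped_paths remove_overlapped_paths_alt
  rw [pvFoldl_eq_go, List.nil_append, pvGo_eq_A]
  simp
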